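-- pv_equiv track=rewrite | github.com/981377660LMT/algorithm-study | 21_位运算/经典题/行的状态/1072. 按列翻转得到最大值等行数-寻找具有相同的特征的行的数量1072. 按列翻转得到最大值等行数-寻找具有相同的特征的行的数量1072. 按列翻转得到最大值等行数-寻找具有相同的特征的行的数量.py | removeOnes
-- ===== SOURCE A (Python) =====
-- from collections import Counter
-- from typing import List
--
-- def removeOnes(grid: List[List[int]]) -> bool:
--     return (
--         len(
--             Counter(
--                 tuple(row) if row[0] else tuple(1 - x for x in row) for row in grid
--             ).values()
--         )
--         == 1
--     )
--     states = set()
--     for row in grid: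
--         cur = []
--         for num in row:
--             cur.append(str(num ^ row[0]))
--         states.add(''.join(cur))
--     return len(states) == 1
-- ===== SOURCE B (Python) =====
-- def removeOnes(grid):
--     if not grid:
--         return False
--     flips = [row[0] == 0 for row in grid]
--     width = len(grid[0])
--     if any(len(row) != width for row in grid):
--         return False
--     n = len(grid)
--     return all(
--         all((1 - grid[i][j] if flips[i] else grid[i][j])
--             == (1 - grid[0][j] if flips[0] else grid[0][j])
--             for i in range(n))
--         for j in range(width)
--     )
-- ===== Notes on version B (the rewrite author's own statement) =====
-- stated objective: alternative
-- what changed: B replaces A's Counter of normalized row-tuples (len(values)==1 test) by a column-major verification: it precomputes a per-row flip flag, rejects ragged grids, and then checks each column is constant after applying the flips, building no normalized rows and no frequency table.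
import Mathlib
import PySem

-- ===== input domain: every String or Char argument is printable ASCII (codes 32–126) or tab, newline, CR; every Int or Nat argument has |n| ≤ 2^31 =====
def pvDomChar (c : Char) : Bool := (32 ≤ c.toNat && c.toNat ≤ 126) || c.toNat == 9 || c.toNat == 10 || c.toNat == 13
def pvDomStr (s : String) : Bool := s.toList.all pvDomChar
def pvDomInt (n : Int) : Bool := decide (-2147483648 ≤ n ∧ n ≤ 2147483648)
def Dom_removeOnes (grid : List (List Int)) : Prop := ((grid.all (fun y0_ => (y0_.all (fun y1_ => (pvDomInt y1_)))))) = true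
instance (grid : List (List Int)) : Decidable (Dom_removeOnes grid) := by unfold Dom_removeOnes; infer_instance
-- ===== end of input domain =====

-- B checks the grid column by column against precomputed flip flags instead of
-- counting normalized row-tuples in a Counter (objective: alternative).

-- ===== PORT A =====
-- canonical form of a row inside A's generator: 'tuple(row) if row[0] else tuple(1 - x for x in row)'
-- (row[0] on an empty row raises IndexError: pyGet? = none there, excluded by Pre_; [] is never reached inside Pre_)
def pvCanonA (row : List Int) : List Int :=
  match PySem.List.pyGet? row 0 with
  | some h => if h ≠ 0 then row else row.map (fun x => 1 - x)
  | none => []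

def removeOnes (grid : List (List Int)) : Bool :=
  ((PySem.Dict.counter (grid.map pvCanonA)).values.length == 1)

-- ===== PORT B =====
-- 'row[0] == 0' (row nonempty under Pre_); range(n)/range(width) over nonnegative bounds ported as List.range (exact there)
def removeOnes_alt (grid : List (List Int)) : Bool :=
  if grid.isEmpty then false
  else
    let flips := grid.map (fun row => ((PySem.List.pyGet? row 0).getD 0) == 0)
    let width := (grid.getD 0 []).length
    if grid.any (fun row => !(row.length == width)) then false
    else
      let n := grid.length
      (List.range width).all (fun j =>
        (List.range n).all (fun i =>
          (if flips.getD i false then 1 - ((grid.getD i []).getD j 0)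
           else (grid.getD i []).getD j 0)
          == (if flips.getD 0 false then 1 - ((grid.getD 0 []).getD j 0)
              else (grid.getD 0 []).getD j 0)))

-- ===== PRECONDITION & SPEC =====
-- Pre_ excludes grids containing an empty row: there A (and B) raise IndexError on row[0].
def Pre_removeOnes (grid : List (List Int)) : Prop := ∀ r ∈ grid, r ≠ []
instance (grid : List (List Int)) : Decidable (Pre_removeOnes grid) := by
  unfold Pre_removeOnes; infer_instance

def pvWitness_removeOnes : List (List Int) := [[1, 0], [0, 1]]

def Spec_removeOnes (grid : List (List Int)) (out : Bool) : Prop := out = removeOnes_alt grid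
instance (grid : List (List Int)) (out : Bool) : Decidable (Spec_removeOnes grid out) := by
  unfold Spec_removeOnes; infer_instance

-- ===== CLAIM (what is proved, stated in full; the proofs are below) =====
def Claim_equal_removeOnes : Prop :=
  ∀ (grid : List (List Int)), Dom_removeOnes grid → Pre_removeOnes grid →
    Spec_removeOnes grid (removeOnes grid)

-- ===== LEMMAS AND PROOFS =====

-- a deduplicated nonempty list has length 1 iff every element equals the head element
theorem set_len_one_iff {α : Type} [BEq α] [LawfulBEq α] (a : α) (t : List α) :
    (PySem.Set.ofList (a :: t)).length = 1 ↔ ∀ x ∈ t, x = a := by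
  constructor
  · intro h1 x hx
    obtain ⟨y, hy⟩ := List.length_eq_one_iff.mp h1
    have ha : a ∈ PySem.Set.ofList (a :: t) := by
      rw [PySem.Set.mem_ofList]; exact List.mem_cons_self
    have hxm : x ∈ PySem.Set.ofList (a :: t) := by
      rw [PySem.Set.mem_ofList]; exact List.mem_cons_of_mem _ hx
    rw [hy] at ha hxm
    simp only [List.mem_singleton] at ha hxm
    rw [hxm, ha]
  · intro hall
    have hsub : ∀ x ∈ PySem.Set.ofList (a :: t), x = a := by
      intro x hx
      rw [PySem.Set.mem_ofList] at hx
      rcases List.mem_cons.mp hx with h | h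
      · exact h
      · exact hall x h
    have hnd : (PySem.Set.ofList (a :: t)).Nodup := PySem.Set.nodup_ofList _
    have ha : a ∈ PySem.Set.ofList (a :: t) := by
      rw [PySem.Set.mem_ofList]; exact List.mem_cons_self
    rcases hs : PySem.Set.ofList (a :: t) with _ | ⟨y, ys⟩
    · rw [hs] at ha; exact absurd ha (List.not_mem_nil)
    · rw [hs] at hsub hnd
      have hy : y = a := hsub y List.mem_cons_self
      have hys : ys = [] := by
        rcases ys with _ | ⟨z, zs⟩
        · rfl
        · have hz : z = a := hsub z (by simp)
          have hni : y ∉ z :: zs := (List.nodup_cons.mp hnd).1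
          exact absurd (by simp [hy, hz]) hni
      simp [hys]

-- A on a nonempty grid decides 'every canonical row equals the first canonical row'
theorem removeOnes_char (g : List Int) (t : List (List Int)) :
    removeOnes (g :: t) = decide (∀ r ∈ g :: t, pvCanonA r = pvCanonA g) := by
  have hkeys : (PySem.Dict.counter ((g :: t).map pvCanonA)).values.length
      = (PySem.Set.ofList ((g :: t).map pvCanonA)).length := by
    have h1 : (PySem.Dict.counter ((g :: t).map pvCanonA)).keys
        = PySem.Set.ofList ((g :: t).map pvCanonA) := PySem.Dict.keys_counter _
    calc (PySem.Dict.counter ((g :: t).map pvCanonA)).values.length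
        = (PySem.Dict.counter ((g :: t).map pvCanonA)).keys.length := by
          simp [PySem.Dict.values, PySem.Dict.keys]
      _ = _ := by rw [h1]
  simp only [removeOnes]
  rw [Bool.eq_iff_iff]
  simp only [beq_iff_eq, decide_eq_true_eq]
  rw [hkeys, List.map_cons, set_len_one_iff]
  constructor
  · intro hall r hr
    rcases List.mem_cons.mp hr with h' | h'
    · rw [h']
    · exact hall (pvCanonA r) (List.mem_map_of_mem h')
  · intro hall x hx
    obtain ⟨r, hr, hxr⟩ := List.mem_map.mp hx
    rw [← hxr]
    exact hall r (List.mem_cons_of_mem _ hr)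

-- canonical row of a nonempty row: flip flag + elementwise flip
def pvFlip (f : Bool) (v : Int) : Int := if f then 1 - v else v

theorem pvCanonA_cons (a : Int) (r : List Int) :
    pvCanonA (a :: r) = (a :: r).map (pvFlip (a == 0)) := by
  by_cases h : a = 0
  · simp [pvCanonA, PySem.List.pyGet?, PySem.List.pyIdx?, pvFlip, h]
  · have hb : (a == 0) = false := by simp [h]
    have hid : pvFlip false = id := funext (fun x => by simp [pvFlip])
    simp [pvCanonA, PySem.List.pyGet?, PySem.List.pyIdx?, h, hb, hid]

theorem pvCanonA_len (r : List Int) (h : r ≠ []) : (pvCanonA r).length = r.length := by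
  cases r with
  | nil => exact absurd rfl h
  | cons a s => rw [pvCanonA_cons]; simp

theorem pvCanonA_getD (r : List Int) (h : r ≠ []) (j : ℕ) (hj : j < r.length) :
    (pvCanonA r).getD j 0
      = pvFlip (((PySem.List.pyGet? r 0).getD 0) == 0) (r.getD j 0) := by
  cases r with
  | nil => exact absurd rfl h
  | cons a s =>
    rw [pvCanonA_cons]
    rw [List.getD_eq_getElem _ 0 (by simpa using hj), List.getD_eq_getElem _ 0 hj,
      List.getElem_map]
    simp [PySem.List.pyGet?, PySem.List.pyIdx?]

-- canonical rows are equal iff the rows have equal length and agree pointwise after flipping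
theorem canon_eq_iff (r g : List Int) (hr : r ≠ []) (hg : g ≠ []) :
    pvCanonA r = pvCanonA g ↔
      (r.length = g.length ∧ ∀ j, j < g.length →
        pvFlip (((PySem.List.pyGet? r 0).getD 0) == 0) (r.getD j 0)
          = pvFlip (((PySem.List.pyGet? g 0).getD 0) == 0) (g.getD j 0)) := by
  constructor
  · intro h
    have hlen : r.length = g.length := by
      have := congrArg List.length h
      rwa [pvCanonA_len r hr, pvCanonA_len g hg] at this
    refine ⟨hlen, fun j hj => ?_⟩
    rw [← pvCanonA_getD r hr j (by omega), ← pvCanonA_getD g hg j hj, h]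
  · rintro ⟨hlen, hpt⟩
    apply List.ext_getElem
    · rw [pvCanonA_len r hr, pvCanonA_len g hg, hlen]
    · intro j h1 h2
      have hj : j < g.length := by rwa [pvCanonA_len g hg] at h2
      have hjr : j < r.length := by omega
      have := hpt j hj
      rw [← pvCanonA_getD r hr j hjr, ← pvCanonA_getD g hg j hj] at this
      rw [List.getD_eq_getElem _ 0 h1, List.getD_eq_getElem _ 0 h2] at this
      exact this

theorem removeOnes_eq (grid : List (List Int)) (hpre : Pre_removeOnes grid) :
    removeOnes grid = removeOnes_alt grid := by
  cases grid with
  | nil => rfl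
  | cons g t =>
    have hg : g ≠ [] := hpre g List.mem_cons_self
    rw [removeOnes_char]
    simp only [removeOnes_alt, List.isEmpty_cons, Bool.false_eq_true, if_false]
    simp only [List.getD_cons_zero]
    have hflip : ∀ k (hk : k < (g :: t).length),
        ((g :: t).map (fun row => ((PySem.List.pyGet? row 0).getD 0) == 0)).getD k false
          = (((PySem.List.pyGet? ((g :: t)[k]'hk) 0).getD 0) == 0) := by
      intro k hk
      rw [List.getD_eq_getElem _ false (by simpa using hk), List.getElem_map]
    have h0 : (0:ℕ) < (g :: t).length := by simp
    by_cases hrect : ∀ r ∈ g :: t, r.length = g.length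
    · have hany : ((g :: t).any fun row => !(row.length == g.length)) = false := by
        simp only [List.any_eq_false, Bool.not_eq_true', beq_eq_false_iff_ne, ne_eq,
          Decidable.not_not]
        exact hrect
      rw [hany, Bool.eq_iff_iff]
      simp only [if_false, Bool.false_eq_true, List.all_eq_true, List.mem_range,
        decide_eq_true_eq, beq_iff_eq]
      constructor
      · intro hall j hj i hi
        have hig : (g :: t)[i]'hi ∈ g :: t := List.getElem_mem hi
        have hialt : ((g :: t).getD i []) = (g :: t)[i]'hi := List.getD_eq_getElem _ [] hi
        rw [hialt, hflip i hi, hflip 0 h0]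
        have hcan := (canon_eq_iff ((g :: t)[i]'hi) g (hpre _ hig) hg).mp (hall _ hig)
        have := hcan.2 j hj
        simpa [pvFlip] using this
      · intro hall r hr
        obtain ⟨i, hi, hir⟩ := List.mem_iff_getElem.mp hr
        rw [← hir]
        have hig : (g :: t)[i]'hi ∈ g :: t := List.getElem_mem hi
        refine (canon_eq_iff ((g :: t)[i]'hi) g (hpre _ hig) hg).mpr
          ⟨hrect _ hig, ?_⟩
        intro j hj
        have := hall j hj i hi
        have hialt : ((g :: t).getD i []) = (g :: t)[i]'hi := List.getD_eq_getElem _ [] hi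
        rw [hialt, hflip i hi, hflip 0 h0] at this
        simpa [pvFlip] using this
    · rw [not_forall] at hrect
      simp only [not_forall, exists_prop] at hrect
      obtain ⟨r, hr, hlen⟩ := hrect
      have hany : ((g :: t).any fun row => !(row.length == g.length)) = true := by
        simp only [List.any_eq_true]
        exact ⟨r, hr, by simp [hlen]⟩
      rw [hany]
      simp only [if_true, decide_eq_false_iff_not]
      intro hall
      exact hlen (by
        have := hall r hr
        have := congrArg List.length this
        rwa [pvCanonA_len r (hpre r hr), pvCanonA_len g hg] at this)

-- ===== VERDICT (by name: the statement is the Claim_ definition above) =====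
theorem removeOnes_spec : Claim_equal_removeOnes := by
  intro grid _ hpre
  unfold Spec_removeOnes
  exact removeOnes_eq grid hpre
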